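-- pv_equiv track=rewrite | github.com/Crocmagnon/python-blog | src/articles/utils.py | truncate_words_after_char_count
-- ===== SOURCE A (Python) =====
-- def truncate_words_after_char_count(text: str, char_count: int) -> str:
--     total_length = 0
--     text_result = []
--     for word in text.split():
--         if len(word) + 1 + total_length > char_count:
--             break
--         text_result.append(word)
--         total_length += len(word) + 1
--     return " ".join(text_result) + "..."
-- ===== SOURCE B (Python) =====
-- def truncate_words_after_char_count(text: str, char_count: int) -> str:
--     words = text.split()
--     lens = [len(w) + 1 for w in words]
--     cums = [sum(lens[: i + 1]) for i in range(len(words))]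
--     kept = [w for w, c in zip(words, cums) if c <= char_count]
--     return " ".join(kept) + "..."
-- ===== Notes on version B (the rewrite author's own statement) =====
-- stated objective: alternative
-- what changed: B separates cost tabulation from selection: it materializes the table of cumulative costs (prefix sums of len(word)+1), then keeps by a filter over zip(words, cums) instead of A's interleaved running total with a break; equivalent because the cumulative costs are strictly increasing.
import Mathlib
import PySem

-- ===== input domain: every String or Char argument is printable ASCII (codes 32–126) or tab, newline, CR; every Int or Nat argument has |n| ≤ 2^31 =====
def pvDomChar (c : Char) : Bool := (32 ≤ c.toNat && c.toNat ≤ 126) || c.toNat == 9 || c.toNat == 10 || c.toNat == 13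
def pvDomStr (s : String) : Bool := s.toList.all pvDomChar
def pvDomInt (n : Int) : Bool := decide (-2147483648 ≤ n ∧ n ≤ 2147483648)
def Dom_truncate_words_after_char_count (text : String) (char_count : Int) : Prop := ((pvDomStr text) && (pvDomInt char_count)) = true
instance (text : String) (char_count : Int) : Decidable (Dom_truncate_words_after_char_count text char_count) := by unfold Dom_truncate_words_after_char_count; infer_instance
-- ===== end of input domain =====

-- B builds the table of cumulative word costs first and then selects by a filter,
-- instead of A's interleaved running total with a break (objective: alternative).

-- ===== PORT A =====
-- the for-loop with running total and break
def pvGoA (char_count : Int) : List String → Int → List String → List String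
  | [], _, acc => acc
  | w :: ws, total, acc =>
    if PySem.Str.len w + 1 + total > char_count then acc
    else pvGoA char_count ws (total + (PySem.Str.len w + 1)) (acc ++ [w])

def truncate_words_after_char_count (text : String) (char_count : Int) : String :=
  PySem.Str.join " " (pvGoA char_count (PySem.Str.split₀ text) 0 []) ++ "..."

-- ===== PORT B =====
def truncate_words_after_char_count_alt (text : String) (char_count : Int) : String :=
  let words := PySem.Str.split₀ text
  let lens := words.map (fun w => PySem.Str.len w + 1)
  let cums := (PySem.List.pyRange 0 (words.length : Int) 1).map
      (fun i => (PySem.List.slice lens none (some (i + 1))).sum)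
  let kept := ((words.zip cums).filter (fun p => decide (p.2 ≤ char_count))).map Prod.fst
  PySem.Str.join " " kept ++ "..."

-- ===== PRECONDITION & SPEC =====
def Spec_truncate_words_after_char_count (text : String) (char_count : Int) (out : String) : Prop := out = truncate_words_after_char_count_alt text char_count
instance (text : String) (char_count : Int) (out : String) : Decidable (Spec_truncate_words_after_char_count text char_count out) := by unfold Spec_truncate_words_after_char_count; infer_instance

-- ===== CLAIM (what is proved, stated in full; the proofs are below) =====
def Claim_equal_truncate_words_after_char_count : Prop := ∀ (text : String) (char_count : Int), Dom_truncate_words_after_char_count text char_count → Spec_truncate_words_after_char_count text char_count (truncate_words_after_char_count text char_count)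

-- ===== LEMMAS AND PROOFS =====

-- the common shape: keep words while the running total stays within char_count
def pvSel (cc : Int) : Int → List String → List String
  | _, [] => []
  | t, w :: ws =>
    if PySem.Str.len w + 1 + t > cc then []
    else w :: pvSel cc (t + (PySem.Str.len w + 1)) ws

-- cumulative costs starting from offset t
def pvCums : Int → List String → List Int
  | _, [] => []
  | t, w :: ws => (t + (PySem.Str.len w + 1)) :: pvCums (t + (PySem.Str.len w + 1)) ws

theorem pvLen_nonneg (w : String) : 0 ≤ PySem.Str.len w := by
  simp [PySem.Str.len_eq]

theorem pvGoA_eq_sel (cc : Int) : ∀ (ws : List String) (t : Int) (acc : List String),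
    pvGoA cc ws t acc = acc ++ pvSel cc t ws := by
  intro ws
  induction ws with
  | nil => intro t acc; simp [pvGoA, pvSel]
  | cons w ws ih =>
      intro t acc
      by_cases h : cc < (w.length : Int) + 1 + t
      · simp [pvGoA, pvSel, h]
      · simp [pvGoA, pvSel, h, ih]

theorem pvCums_ge (ws : List String) : ∀ (t c : Int), c ∈ pvCums t ws → t + 1 ≤ c := by
  induction ws with
  | nil => intro t c hc; simp [pvCums] at hc
  | cons w ws ih =>
      intro t c hc
      simp only [pvCums, List.mem_cons] at hc
      have hw := pvLen_nonneg w
      rcases hc with rfl | hc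
      · omega
      · have := ih _ _ hc; omega

theorem pvFilter_zip_cums (cc : Int) : ∀ (ws : List String) (t : Int),
    ((ws.zip (pvCums t ws)).filter (fun p => decide (p.2 ≤ cc))).map Prod.fst = pvSel cc t ws := by
  intro ws
  induction ws with
  | nil => intro t; simp [pvCums, pvSel]
  | cons w ws ih =>
      intro t
      by_cases h : t + ((w.length : Int) + 1) ≤ cc
      · have h' : ¬ (cc < (w.length : Int) + 1 + t) := by omega
        simp [pvCums, pvSel, h, h', ih]
      · have h' : cc < (w.length : Int) + 1 + t := by omega
        have hnil : ((ws.zip (pvCums (t + ((w.length : Int) + 1)) ws)).filter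
            (fun p => decide (p.2 ≤ cc))) = [] := by
          rw [List.filter_eq_nil_iff]
          intro p hp
          have hc := pvCums_ge ws _ _ (List.of_mem_zip hp).2
          simp
          omega
        simp [pvCums, pvSel, h, h', hnil]

theorem pvCums_eq (ws : List String) : ∀ (t : Int),
    (List.range ws.length).map
      (fun k => t + (((ws.map (fun w => PySem.Str.len w + 1)).take (k + 1)).sum)) = pvCums t ws := by
  induction ws with
  | nil => intro t; simp [pvCums]
  | cons w ws ih =>
      intro t
      rw [List.length_cons, List.range_succ_eq_map]
      simp only [List.map_cons, List.map_map, List.take_succ_cons, List.sum_cons, List.take_zero,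
        List.sum_nil, pvCums]
      refine congrArg₂ _ (by ring) ?_
      rw [← ih (t + (PySem.Str.len w + 1))]
      apply List.map_congr_left
      intro k _
      simp [PySem.Str.len_eq]
      ring

-- ===== VERDICT (by name: the statement is the Claim_ definition above) =====
theorem truncate_words_after_char_count_spec : Claim_equal_truncate_words_after_char_count := by
  intro text cc _
  unfold Spec_truncate_words_after_char_count truncate_words_after_char_count
    truncate_words_after_char_count_alt
  set ws := PySem.Str.split₀ text with hws
  have hcums : (PySem.List.pyRange 0 (ws.length : Int) 1).map
      (fun i => (PySem.List.slice (ws.map (fun w => PySem.Str.len w + 1)) none (some (i + 1))).sum)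
      = pvCums 0 ws := by
    rw [PySem.List.pyRange_one]
    simp only [Int.sub_zero, Int.toNat_natCast, List.map_map]
    rw [← pvCums_eq ws 0]
    apply List.map_congr_left
    intro k _
    have hcast : ((0 : Int) + (k : Int) + 1) = (((k + 1 : Nat)) : Int) := by push_cast; ring
    simp only [Function.comp, hcast, PySem.List.slice_to_natCast]
    ring_nf
  simp only [hcums]
  congr 1
  apply congrArg
  rw [pvGoA_eq_sel, List.nil_append, pvFilter_zip_cums]
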